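-- pv_equiv track=rewrite | github.com/molya-polat/LeetCode_practice | problems/3818-minimum-prefix-removal-to-make-array-strictly-increasing/3818-minimum-prefix-removal-to-make-array-strictly-increasing.py | minimumPrefixLength
-- ===== SOURCE A (Python) =====
-- from typing import List
--
-- def minimumPrefixLength(nums: List[int]) -> int:
--     ans = 0
--     increasing_len = 0
--     for i in range(len(nums) -1):
--         if nums[i] >= nums[i + 1]:
--             ans += increasing_len + 1
--             increasing_len = 0
--         else:
--             increasing_len += 1
--
--     return ans
-- ===== SOURCE B (Python) =====
-- from typing import List
--
-- def minimumPrefixLength(nums: List[int]) -> int: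
--     i = len(nums) - 1
--     while i > 0 and nums[i - 1] < nums[i]:
--         i -= 1
--     return max(i, 0)
-- ===== Notes on version B (the rewrite author's own statement) =====
-- stated objective: simpler
-- what changed: Replaces A's full forward pass accumulating (ans, increasing_len) with a backward scan from the last index that stops at the first non-increase (early termination), returning the start index of the longest strictly-increasing suffix; max(i,0) covers the empty list.
import Mathlib
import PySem

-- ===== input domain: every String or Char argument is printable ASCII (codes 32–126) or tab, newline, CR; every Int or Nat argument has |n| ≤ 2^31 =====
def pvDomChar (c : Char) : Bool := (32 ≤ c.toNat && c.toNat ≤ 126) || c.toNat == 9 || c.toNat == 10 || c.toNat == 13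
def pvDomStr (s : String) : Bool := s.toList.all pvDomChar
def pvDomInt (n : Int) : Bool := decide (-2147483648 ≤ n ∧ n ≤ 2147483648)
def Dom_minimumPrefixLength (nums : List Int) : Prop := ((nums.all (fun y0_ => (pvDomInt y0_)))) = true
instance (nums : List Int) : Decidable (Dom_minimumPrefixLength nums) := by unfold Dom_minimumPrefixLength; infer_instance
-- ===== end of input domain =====

-- B replaces A's forward accumulating pass by a backward scan with early termination:
-- the answer is the start index of the longest strictly-increasing suffix (objective: simpler).

-- ===== PORT A =====
-- forward pass over range(len(nums)-1) accumulating (ans, increasing_len);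
-- indices produced by range are in bounds, so pyGetD with default 0 is exact
def minimumPrefixLength (nums : List Int) : Int :=
  ((PySem.List.pyRange 0 ((nums.length : Int) - 1) 1).foldl
    (fun (st : Int × Int) (i : Int) =>
      if PySem.List.pyGetD nums (i + 1) 0 ≤ PySem.List.pyGetD nums i 0 then
        (st.1 + st.2 + 1, 0)
      else
        (st.1, st.2 + 1))
    (0, 0)).1

-- ===== PORT B =====
-- while i > 0 and nums[i-1] < nums[i]: i -= 1   (i counted down, so structural recursion on i)
def pvAltLoop (nums : List Int) : Nat → Nat
  | 0 => 0
  | i + 1 =>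
    if PySem.List.pyGetD nums (i : Int) 0 < PySem.List.pyGetD nums ((i : Int) + 1) 0 then
      pvAltLoop nums i
    else
      i + 1

-- i = len(nums) - 1 (so -1 for the empty list); return max(i, 0)
def minimumPrefixLength_alt (nums : List Int) : Int :=
  match nums.length with
  | 0 => max (-1 : Int) 0
  | n + 1 => max ((pvAltLoop nums n : Nat) : Int) 0

-- ===== PRECONDITION & SPEC =====
def Spec_minimumPrefixLength (nums : List Int) (out : Int) : Prop := out = minimumPrefixLength_alt nums
instance (nums : List Int) (out : Int) : Decidable (Spec_minimumPrefixLength nums out) := by unfold Spec_minimumPrefixLength; infer_instance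

-- ===== CLAIM =====
def Claim_equal_minimumPrefixLength : Prop := ∀ (nums : List Int), Dom_minimumPrefixLength nums → Spec_minimumPrefixLength nums (minimumPrefixLength nums)

-- ===== LEMMAS AND PROOFS =====

-- length of the strictly-increasing run of adjacent pairs ending just before index j
def pvRun (nums : List Int) : Nat → Nat
  | 0 => 0
  | j + 1 =>
    if PySem.List.pyGetD nums ((j : Int) + 1) 0 ≤ PySem.List.pyGetD nums (j : Int) 0 then 0
    else pvRun nums j + 1

theorem pvRun_le (nums : List Int) (j : Nat) : pvRun nums j ≤ j := by
  induction j with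
  | zero => simp [pvRun]
  | succ j ih =>
    unfold pvRun
    split <;> omega

theorem foldA_eq (nums : List Int) (j : Nat) :
    ((PySem.List.pyRange 0 (j : Int) 1).foldl
      (fun (st : Int × Int) (i : Int) =>
        if PySem.List.pyGetD nums (i + 1) 0 ≤ PySem.List.pyGetD nums i 0 then
          (st.1 + st.2 + 1, 0)
        else
          (st.1, st.2 + 1))
      (0, 0)) = ((j : Int) - (pvRun nums j : Nat), ((pvRun nums j : Nat) : Int)) := by
  induction j with
  | zero => simp [pvRun]
  | succ j ih =>
    have hcast : ((j + 1 : Nat) : Int) = (j : Int) + 1 := by push_cast; ring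
    rw [hcast, PySem.List.pyRange_one_succ_right (by positivity), List.foldl_append, ih]
    simp only [List.foldl]
    rw [show pvRun nums (j + 1) = if PySem.List.pyGetD nums ((j : Int) + 1) 0 ≤ PySem.List.pyGetD nums (j : Int) 0 then 0 else pvRun nums j + 1 from rfl]
    split_ifs <;> simp only [Prod.mk.injEq] <;> constructor <;> push_cast <;> omega

theorem altLoop_eq (nums : List Int) (j : Nat) :
    ((pvAltLoop nums j : Nat) : Int) = (j : Int) - (pvRun nums j : Nat) := by
  induction j with
  | zero => simp [pvAltLoop, pvRun]
  | succ j ih =>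
    unfold pvAltLoop pvRun
    by_cases h : PySem.List.pyGetD nums ((j : Int) + 1) 0 ≤ PySem.List.pyGetD nums (j : Int) 0
    · rw [if_neg (by omega), if_pos h]; push_cast; ring
    · rw [if_pos (by omega), if_neg h, ih]; push_cast; ring

-- ===== VERDICT =====
theorem minimumPrefixLength_spec : Claim_equal_minimumPrefixLength := by
  intro nums _
  unfold Spec_minimumPrefixLength minimumPrefixLength minimumPrefixLength_alt
  cases hlen : nums.length with
  | zero =>
    simp
  | succ n =>
    have hc : (((n + 1 : Nat) : Int) - 1) = (n : Int) := by push_cast; ring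
    rw [hc, foldA_eq]
    have h1 := pvRun_le nums n
    have h2 := altLoop_eq nums n
    show _ = max ((pvAltLoop nums n : Nat) : Int) 0
    omega
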